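-- pv_equiv track=rewrite | github.com/KristijanBoshev/Competitve-Programming | pattern-based/app.py | generate_right_angled_triangle
-- ===== SOURCE A (Python) =====
-- def generate_right_angled_triangle(n):
--     """
--     Function to return a right-angled triangle of '*' of side n as a list of strings.
--
--     Parameters:
--     n (int): The height of the triangle.
--
--     Returns:
--     list: A list of strings where each string represents a row of the triangle.
--
--     Input: 4
--     Output: ['   *', '  **', ' ***', '****']
--     """
--
--     lst=[]
--
--     for i in range(1, n+1):
--         whitespace = ' ' * (n-i)
--         asterix = '*' * (n - (n-i))
--         word = whitespace + asterix
--         lst.append(word)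
--
--     return lst
-- ===== SOURCE B (Python) =====
-- def generate_right_angled_triangle(n):
--     base = ' ' * (n - 1) + '*' * n
--     return [base[i:i + n] for i in range(n)]
-- ===== Notes on version B (the rewrite author's own statement) =====
-- stated objective: alternative
-- what changed: B precomputes one master buffer ' '*(n-1)+'*'*n and produces each row by slicing an n-wide window from it, instead of A's per-row whitespace/asterisk arithmetic and list-accumulator loop.
import Mathlib
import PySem

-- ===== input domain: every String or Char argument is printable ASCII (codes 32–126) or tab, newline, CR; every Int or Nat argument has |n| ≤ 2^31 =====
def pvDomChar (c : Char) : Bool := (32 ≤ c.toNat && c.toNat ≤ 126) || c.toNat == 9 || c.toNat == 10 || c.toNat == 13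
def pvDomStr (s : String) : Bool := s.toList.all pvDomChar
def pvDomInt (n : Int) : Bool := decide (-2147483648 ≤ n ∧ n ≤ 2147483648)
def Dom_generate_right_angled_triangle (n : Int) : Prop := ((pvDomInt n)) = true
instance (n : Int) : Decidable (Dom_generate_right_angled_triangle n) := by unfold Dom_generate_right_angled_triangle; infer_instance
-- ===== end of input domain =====

-- B builds every row by slicing an n-wide window from one precomputed buffer instead of A's per-row space/star arithmetic.

-- ===== PORT A =====
def generate_right_angled_triangle (n : Int) : List String :=
  (PySem.List.pyRange 1 (n + 1) 1).foldl (fun lst i =>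
    let whitespace := List.replicate (n - i).toNat ' '
    let asterix := List.replicate (n - (n - i)).toNat '*'
    let word := whitespace ++ asterix
    lst ++ [String.ofList word]) []

-- ===== PORT B =====
def generate_right_angled_triangle_alt (n : Int) : List String :=
  let base := List.replicate (n - 1).toNat ' ' ++ List.replicate n.toNat '*'
  (PySem.List.pyRange 0 n 1).map (fun i =>
    String.ofList (PySem.List.slice base (some i) (some (i + n))))

-- ===== PRECONDITION & SPEC =====
def Spec_generate_right_angled_triangle (n : Int) (out : List String) : Prop := out = generate_right_angled_triangle_alt n
instance (n : Int) (out : List String) : Decidable (Spec_generate_right_angled_triangle n out) := by unfold Spec_generate_right_angled_triangle; infer_instance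

-- ===== CLAIM (what is proved, stated in full; the proofs are below) =====
def Claim_equal_generate_right_angled_triangle : Prop := ∀ (n : Int), Dom_generate_right_angled_triangle n → Spec_generate_right_angled_triangle n (generate_right_angled_triangle n)

-- ===== LEMMAS AND PROOFS =====

-- A's append loop is a map over the range.
theorem pv_foldl_append_map {α β : Type} (f : α → β) (l : List α) (acc : List β) :
    l.foldl (fun lst i => lst ++ [f i]) acc = acc ++ l.map f := by
  induction l generalizing acc with
  | nil => simp
  | cons x xs ih => simp [List.foldl_cons, ih]

-- the window sliced at position k equals A's k-th row (Nat form)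
theorem pv_window (m k : Nat) (hk : k < m) :
    ((List.replicate (m - 1) ' ' ++ List.replicate m '*').drop k).take m
      = List.replicate (m - 1 - k) ' ' ++ List.replicate (k + 1) '*' := by
  rw [List.drop_append, List.take_append]
  simp only [List.drop_replicate, List.take_replicate, List.length_replicate]
  have h2 : min m (m - 1 - k) = m - 1 - k := by omega
  have h3 : min (m - (m - 1 - k)) (m - (k - (m - 1))) = k + 1 := by omega
  rw [h2, h3]

-- ===== VERDICT (by name: the statement is the Claim_ definition above) =====
theorem generate_right_angled_triangle_spec : Claim_equal_generate_right_angled_triangle := by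
  intro n _
  unfold Spec_generate_right_angled_triangle generate_right_angled_triangle generate_right_angled_triangle_alt
  rw [pv_foldl_append_map, List.nil_append]
  have e1 : n + 1 - 1 = n := by ring
  have e2 : n - 0 = n := by ring
  rw [PySem.List.pyRange_one 1 (n + 1), PySem.List.pyRange_one 0 n, e1, e2,
    List.map_map, List.map_map]
  refine List.map_congr_left (fun k hk => ?_)
  rw [List.mem_range] at hk
  have hm : n = ((n.toNat : Int)) := by omega
  set m := n.toNat with hmdef
  simp only [Function.comp, zero_add]
  rw [hm]
  have hw : ((m : Int) - (1 + (k : Int))).toNat = m - 1 - k := by omega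
  have ha : ((m : Int) - ((m : Int) - (1 + (k : Int)))).toNat = k + 1 := by omega
  have hb : ((m : Int) - 1).toNat = m - 1 := by omega
  rw [hb, hw, ha,
    PySem.List.slice_natCast_add, pv_window m k hk]
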